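-- pv_equiv track=rewrite | github.com/PowerLichen/CodeTest | Programmers-py/132267.py | solution
-- ===== SOURCE A (Python) =====
-- def solution(a, b, n):
--     answer = 0
--     while n // a > 0:
--         recycle = n // a
--         n -= recycle * a
--         recycle = recycle * b
--         answer += recycle
--         n += recycle
--
--     return answer
-- ===== SOURCE B (Python) =====
-- def solution(a, b, n):
--     # Closed form: each exchange nets -(a-b) empties; total exchanges from n>=a is (n-a)//(a-b)+1.
--     if n // a <= 0:
--         return 0
--     return b * ((n - a) // (a - b) + 1)
-- ===== Notes on version B (the rewrite author's own statement) =====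
-- stated objective: simpler
-- what changed: Replaces A's repeated batch-exchange while loop by a closed form: no exchange possible gives 0, otherwise b*((n-a)//(a-b)+1), since each single exchange nets -(a-b) empty bottles.
-- outside the precondition, e.g. on solution(3, -1, 10): A returns -3, B returns -2; on solution(-2, 5, -5): A returns 10, B returns 5
import Mathlib
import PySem

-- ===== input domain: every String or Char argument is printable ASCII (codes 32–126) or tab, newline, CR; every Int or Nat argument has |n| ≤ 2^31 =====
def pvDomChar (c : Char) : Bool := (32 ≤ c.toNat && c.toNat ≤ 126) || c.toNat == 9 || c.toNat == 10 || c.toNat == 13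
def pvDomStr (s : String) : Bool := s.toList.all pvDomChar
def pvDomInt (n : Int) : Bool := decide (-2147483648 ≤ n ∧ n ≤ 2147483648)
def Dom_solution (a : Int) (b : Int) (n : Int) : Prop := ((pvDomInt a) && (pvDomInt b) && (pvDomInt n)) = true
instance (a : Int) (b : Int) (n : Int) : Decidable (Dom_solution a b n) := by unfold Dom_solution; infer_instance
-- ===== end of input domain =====

-- B replaces A's repeated-exchange loop by the closed form b*((n-a)//(a-b)+1); equivalence is proved on the natural domain 0 ≤ b < a (plus all no-exchange inputs).

-- ===== PORT A =====
-- A's while loop, as structural recursion on explicit fuel; under Pre_solution each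
-- iteration strictly decreases n, so fuel n.natAbs + a.natAbs + 1 is never exhausted (proved below).
def solutionLoop (a : Int) (b : Int) : Nat → Int → Int → Int
  | 0, _, answer => answer
  | f + 1, n, answer =>
    if PySem.Int.floordiv n a > 0 then
      let recycle := PySem.Int.floordiv n a
      let n1 := n - recycle * a
      let recycle1 := recycle * b
      solutionLoop a b f (n1 + recycle1) (answer + recycle1)
    else answer

def solution (a : Int) (b : Int) (n : Int) : Int :=
  solutionLoop a b (n.natAbs + a.natAbs + 1) n 0

-- ===== PORT B =====
def solution_alt (a : Int) (b : Int) (n : Int) : Int :=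
  if PySem.Int.floordiv n a ≤ 0 then 0
  else b * (PySem.Int.floordiv (n - a) (a - b) + 1)

-- ===== PRECONDITION & SPEC =====
-- Pre_ excludes a = 0 (both programs raise ZeroDivisionError) and the inputs on which
-- the loop would run with b ≥ a (A loops forever) or with b < 0 or a < 0 — bottle
-- counts outside the problem's natural domain 0 ≤ b < a, where A's accumulated value
-- is an artefact of batching (e.g. A(3,-1,10) = -3 while the closed form gives -2).
def Pre_solution (a : Int) (b : Int) (n : Int) : Prop :=
  (0 ≤ b ∧ b < a) ∨ (a ≠ 0 ∧ PySem.Int.floordiv n a ≤ 0)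
instance (a : Int) (b : Int) (n : Int) : Decidable (Pre_solution a b n) := by
  unfold Pre_solution; infer_instance
def pvWitness_solution : Int × Int × Int := (3, 1, 10)
def Spec_solution (a : Int) (b : Int) (n : Int) (out : Int) : Prop := out = solution_alt a b n
instance (a : Int) (b : Int) (n : Int) (out : Int) : Decidable (Spec_solution a b n out) := by unfold Spec_solution; infer_instance

-- ===== CLAIM (what is proved, stated in full; the proofs are below) =====
def Claim_equal_solution : Prop := ∀ (a : Int) (b : Int) (n : Int), Dom_solution a b n → Pre_solution a b n → Spec_solution a b n (solution a b n)

-- ===== LEMMAS AND PROOFS =====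

-- Under 0 ≤ b < a, the loop with enough fuel computes ans plus the closed form.
theorem solutionLoop_closed (a b : Int) (hb : 0 ≤ b) (hab : b < a) :
    ∀ (f : Nat) (n ans : Int), n < a + (f : Int) →
      solutionLoop a b f n ans = ans + solution_alt a b n := by
  intro f
  induction f with
  | zero =>
    intro n ans hfuel
    have ha : 0 < a := lt_of_le_of_lt hb hab
    have hle : PySem.Int.floordiv n a ≤ 0 := by
      have := (PySem.Int.floordiv_lt_iff_lt_mul (a := n) (b := a) (q := 1) ha).2 (by omega)
      omega
    simp [solutionLoop, solution_alt, hle]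
  | succ f ih =>
    intro n ans hfuel
    have ha : 0 < a := lt_of_le_of_lt hb hab
    have hd : 0 < a - b := by omega
    by_cases hpos : PySem.Int.floordiv n a > 0
    · -- one loop iteration
      set q := PySem.Int.floordiv n a with hq
      have hqa : q * a ≤ n ∧ n < (q + 1) * a :=
        (PySem.Int.floordiv_eq_iff_of_pos ha).1 hq.symm
      have hq1 : 1 ≤ q := hpos
      -- the new n after one iteration
      have hn1 : n - q * a + q * b = n - q * (a - b) := by ring
      have hdec : n - q * (a - b) ≤ n - (a - b) := by nlinarith
      have hfuel' : n - q * (a - b) < a + (f : Int) := by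
        push_cast at hfuel ⊢; omega
      have hstep : solutionLoop a b (f + 1) n ans
          = solutionLoop a b f (n - q * (a - b)) (ans + q * b) := by
        rw [show n - q * (a - b) = n - q * a + q * b from by ring]
        simp only [solutionLoop, if_pos hpos, ← hq]
      rw [hstep, ih _ _ hfuel']
      -- closed-form recurrence
      have hne : n ≥ a := by nlinarith
      have hAn : PySem.Int.floordiv n a > 0 := hpos
      by_cases hpos' : PySem.Int.floordiv (n - q * (a - b)) a > 0
      · -- still exchanging: (n-a)//d = q + ((n - q*d) - a)//d
        have hq'a : (PySem.Int.floordiv (n - q * (a - b)) a) * a ≤ n - q * (a - b) ∧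
            n - q * (a - b) < ((PySem.Int.floordiv (n - q * (a - b)) a) + 1) * a :=
          (PySem.Int.floordiv_eq_iff_of_pos ha).1 rfl
        have hge' : a ≤ n - q * (a - b) := by nlinarith [hq'a.1, hpos']
        have hshift : PySem.Int.floordiv (n - a) (a - b)
            = q + PySem.Int.floordiv (n - q * (a - b) - a) (a - b) := by
          rw [PySem.Int.floordiv_eq_ediv_of_pos hd, PySem.Int.floordiv_eq_ediv_of_pos hd]
          have : n - q * (a - b) - a = (n - a) + (-q) * (a - b) := by ring
          rw [this, Int.add_mul_ediv_right _ _ (by omega : a - b ≠ 0)]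
          ring
        simp only [solution_alt, if_neg (by omega : ¬ PySem.Int.floordiv n a ≤ 0),
          if_neg (by omega : ¬ PySem.Int.floordiv (n - q * (a - b)) a ≤ 0), hshift]
        ring
      · -- last batch: (n-a)//d = q - 1
        have hlt' : n - q * (a - b) < a := by
          by_contra hge
          rw [not_lt] at hge
          have : 1 ≤ PySem.Int.floordiv (n - q * (a - b)) a :=
            (PySem.Int.le_floordiv_iff_mul_le (a := n - q * (a - b)) (b := a) (q := 1) ha).2
              (by omega)
          omega
        have hclosed : PySem.Int.floordiv (n - a) (a - b) = q - 1 := by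
          rw [PySem.Int.floordiv_eq_iff_of_pos hd]
          constructor
          · nlinarith [hqa.1]
          · nlinarith
        simp only [solution_alt, if_neg (by omega : ¬ PySem.Int.floordiv n a ≤ 0),
          if_pos (by omega : PySem.Int.floordiv (n - q * (a - b)) a ≤ 0), hclosed]
        ring
    · -- loop does not run
      have hle : PySem.Int.floordiv n a ≤ 0 := by omega
      simp [solutionLoop, hpos, solution_alt, hle]

-- ===== VERDICT (by name: the statement is the Claim_ definition above) =====
theorem solution_spec : Claim_equal_solution := by
  intro a b n _ hpre
  unfold Spec_solution solution
  rcases hpre with ⟨hb, hab⟩ | ⟨ha, hle⟩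
  · have hfuel : n < a + ((n.natAbs + a.natAbs + 1 : Nat) : Int) := by
      push_cast [Int.natCast_natAbs]
      have h1 : n ≤ |n| := le_abs_self n
      have h2 : (0:Int) ≤ |a| := abs_nonneg a
      omega
    simpa using solutionLoop_closed a b hb hab (n.natAbs + a.natAbs + 1) n 0 hfuel
  · simp [solutionLoop, solution_alt, hle, not_lt.2 hle]
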